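-- pv_equiv track=rewrite | github.com/jdbabcock/TraderBot_V1 | app/run.py | _normalize_asset_code
-- ===== SOURCE A (Python) =====
-- def _normalize_asset_code(asset):
--     norm = asset or ""
--     if not isinstance(norm, str):
--         return norm
--     # Drop Kraken suffixes like .F or .S
--     if "." in norm:
--         norm = norm.split(".", 1)[0]
--     # Strip leading X/Z multiple times (Kraken uses XXBT, ZUSD, etc.)
--     while len(norm) > 3 and norm[0] in ("X", "Z"):
--         norm = norm[1:]
--     if norm == "XBT":
--         norm = "BTC"
--     return norm
-- ===== SOURCE B (Python) =====
-- def _normalize_asset_code(asset):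
--     norm = asset or ""
--     if not isinstance(norm, str):
--         return norm
--     # keep only the part before the first '.' (Kraken suffixes like .F / .S)
--     norm = norm.partition(".")[0]
--     # strip the leading run of X/Z letters, but never below 3 remaining chars
--     p = len(norm) - len(norm.lstrip("XZ"))
--     norm = norm[min(p, max(len(norm) - 3, 0)):]
--     return "BTC" if norm == "XBT" else norm
-- ===== Notes on version B (the rewrite author's own statement) =====
-- stated objective: alternative
-- what changed: A strips leading X/Z one character at a time in a while loop (and splits on a dot only after a membership test); B computes the answer in closed form: take the text before the first dot, count the leading X/Z run with lstrip, and drop min(run, len-3) characters in one slice.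
import Mathlib
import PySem

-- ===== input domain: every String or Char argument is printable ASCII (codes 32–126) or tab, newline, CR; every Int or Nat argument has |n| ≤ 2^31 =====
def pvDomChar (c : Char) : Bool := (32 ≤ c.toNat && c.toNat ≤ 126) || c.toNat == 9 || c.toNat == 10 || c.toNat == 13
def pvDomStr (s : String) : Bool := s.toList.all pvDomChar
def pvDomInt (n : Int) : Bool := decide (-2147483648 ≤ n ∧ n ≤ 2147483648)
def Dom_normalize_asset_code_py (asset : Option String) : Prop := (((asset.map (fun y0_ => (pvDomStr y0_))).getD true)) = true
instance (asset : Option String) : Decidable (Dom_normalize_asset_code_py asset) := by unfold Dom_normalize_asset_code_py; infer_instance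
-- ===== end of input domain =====

-- B replaces A's one-char-at-a-time while loop by a closed-form count-then-slice
-- (count the leading X/Z run, drop min(run, len-3) chars in one slice); objective: alternative.

-- ===== PORT A =====
-- if "." in norm: norm = norm.split(".", 1)[0]  (split returns a nonempty list; [0] is its head)
def pyA_prefix (cs : List Char) : List Char :=
  if PySem.Chars.isIn ['.'] cs then (PySem.Chars.splitOnMax cs ['.'] 1).headD [] else cs

-- while len(norm) > 3 and norm[0] in ("X", "Z"): norm = norm[1:]
def pyStripXZ : List Char → List Char
  | [] => []
  | c :: rest =>
      if 3 < (c :: rest).length ∧ (c = 'X' ∨ c = 'Z') then pyStripXZ rest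
      else c :: rest

-- if norm == "XBT": norm = "BTC"
def pyA_btc (cs : List Char) : String :=
  if cs = ['X', 'B', 'T'] then "BTC" else String.ofList cs

def normalize_asset_code_py (asset : Option String) : String :=
  -- norm = asset or ""  (None and "" are both falsy → ""); isinstance(norm, str) always holds here
  pyA_btc (pyStripXZ (pyA_prefix (asset.getD "").toList))

-- ===== PORT B =====
-- p = len(norm) - len(norm.lstrip("XZ")); norm = norm[min(p, max(len(norm)-3, 0)):]
-- (lstrip with a char set = dropWhile membership; the slice index is ≥ 0, so the slice is a plain drop)
def pyB_strip (cs : List Char) : List Char :=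
  cs.drop (min (cs.length - (cs.dropWhile (fun c => c = 'X' || c = 'Z')).length) (max (cs.length - 3) 0))

-- return "BTC" if norm == "XBT" else norm
def pyB_btc (cs : List Char) : String :=
  if cs = ['X', 'B', 'T'] then "BTC" else String.ofList cs

def normalize_asset_code_py_alt (asset : Option String) : String :=
  -- norm = asset or ""; norm.partition(".")[0] = everything before the first '.'
  pyB_btc (pyB_strip (((asset.getD "").toList).takeWhile (fun c => c ≠ '.')))

-- ===== PRECONDITION & SPEC =====
def Spec_normalize_asset_code_py (asset : Option String) (out : String) : Prop := out = normalize_asset_code_py_alt asset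
instance (asset : Option String) (out : String) : Decidable (Spec_normalize_asset_code_py asset out) := by unfold Spec_normalize_asset_code_py; infer_instance

-- ===== CLAIM (what is proved, stated in full; the proofs are below) =====
def Claim_equal_normalize_asset_code_py : Prop := ∀ (asset : Option String), Dom_normalize_asset_code_py asset → Spec_normalize_asset_code_py asset (normalize_asset_code_py asset)

-- ===== LEMMAS AND PROOFS =====

-- maxsplit = 0 closes go immediately, whatever the fuel and the remaining input
theorem splitOnMax_go_zero (sep : List Char) (f : Nat) (l cur : List Char) (acc : List (List Char)) :
    PySem.Chars.splitOnMax.go sep f 0 l cur acc = ((cur.reverse ++ l) :: acc).reverse := by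
  cases f with
  | zero => simp [PySem.Chars.splitOnMax.go]
  | succ f =>
    cases l with
    | nil => simp [PySem.Chars.splitOnMax.go]
    | cons c rest => simp [PySem.Chars.splitOnMax.go]

-- head of split(".", 1) is the text before the first '.'
theorem splitOnMax_go_head (f : Nat) :
    ∀ (cs cur : List Char), cs.length < f →
    (PySem.Chars.splitOnMax.go ['.'] f 1 cs cur []).headD []
      = cur.reverse ++ cs.takeWhile (fun c => c ≠ '.') := by
  induction f with
  | zero => intro cs cur h; omega
  | succ f ih =>
    intro cs cur h
    cases cs with
    | nil => simp [PySem.Chars.splitOnMax.go]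
    | cons c rest =>
      by_cases hc : c = '.'
      · subst hc
        simp [PySem.Chars.splitOnMax.go, List.isPrefixOf, splitOnMax_go_zero]
      · have : (['.'].isPrefixOf (c :: rest)) = false := by
          simp [List.isPrefixOf]; exact fun h => absurd h.symm hc
        simp only [PySem.Chars.splitOnMax.go, this, Bool.false_eq_true, if_false,
          if_neg (by omega : ¬ (1 : Nat) = 0)]
        rw [ih rest (c :: cur) (by simp at h ⊢; omega)]
        simp [hc]

theorem split_head_eq_takeWhile (cs : List Char) :
    (PySem.Chars.splitOnMax cs ['.'] 1).headD [] = cs.takeWhile (fun c => c ≠ '.') := by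
  have h1 : ¬ ((1 : Int) < 0) := by omega
  simp only [PySem.Chars.splitOnMax, if_neg h1]
  have := splitOnMax_go_head (cs.length + 1) cs [] (by omega)
  simpa using this

-- the while loop = drop min(leading X/Z run, len - 3)
theorem stripXZ_eq_drop (cs : List Char) :
    pyStripXZ cs
      = cs.drop (min (cs.takeWhile (fun c => c = 'X' || c = 'Z')).length (cs.length - 3)) := by
  induction cs with
  | nil => simp [pyStripXZ]
  | cons c rest ih =>
    by_cases hP : c = 'X' ∨ c = 'Z'
    · have hPb : (decide (c = 'X') || decide (c = 'Z')) = true := by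
        rcases hP with h | h <;> simp [h]
      by_cases hlen : 3 < (c :: rest).length
      · rw [pyStripXZ, if_pos ⟨hlen, hP⟩, ih]
        have hr : 3 ≤ rest.length := by simp at hlen; omega
        have hmin : min ((rest.takeWhile (fun c => c = 'X' || c = 'Z')).length) (rest.length - 3) + 1
            = min (((c :: rest).takeWhile (fun c => c = 'X' || c = 'Z')).length) ((c :: rest).length - 3) := by
          simp [hPb]
          omega
        rw [← hmin]
        rfl
      · rw [pyStripXZ, if_neg (by tauto)]
        have h3 : (c :: rest).length - 3 = 0 := by simp at hlen ⊢; omega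
        rw [h3, Nat.min_zero, List.drop_zero]
    · have hPb : (decide (c = 'X') || decide (c = 'Z')) = false := by
        simp only [Bool.or_eq_false_iff, decide_eq_false_iff_not]
        exact ⟨fun h => hP (Or.inl h), fun h => hP (Or.inr h)⟩
      rw [pyStripXZ, if_neg (by tauto)]
      simp [hPb]

-- no '.' in cs → takeWhile (· ≠ '.') keeps everything
theorem takeWhile_all_of_not_isIn (cs : List Char) (h : PySem.Chars.isIn ['.'] cs = false) :
    cs.takeWhile (fun c => c ≠ '.') = cs := by
  rw [PySem.Chars.isIn_eq_false_iff] at h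
  apply List.takeWhile_eq_self_iff.mpr
  intro c hc
  simp only [ne_eq, decide_eq_true_eq]
  intro hcdot
  subst hcdot
  obtain ⟨s, t, rfl⟩ := List.append_of_mem hc
  exact h ⟨s, t, by simp⟩

theorem prefix_eq_takeWhile (cs : List Char) :
    pyA_prefix cs = cs.takeWhile (fun c => c ≠ '.') := by
  unfold pyA_prefix
  by_cases h : PySem.Chars.isIn ['.'] cs
  · rw [if_pos h, split_head_eq_takeWhile]
  · rw [if_neg h, takeWhile_all_of_not_isIn cs (by simpa using h)]

-- len - len(dropWhile p) = len(takeWhile p)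
theorem length_sub_dropWhile (p : Char → Bool) (ds : List Char) :
    ds.length - (ds.dropWhile p).length = (ds.takeWhile p).length := by
  have hlen : (ds.takeWhile p).length + (ds.dropWhile p).length = ds.length := by
    conv_rhs => rw [← List.takeWhile_append_dropWhile (p := p) (l := ds)]
    rw [List.length_append]
  omega

-- ===== VERDICT (by name: the statement is the Claim_ definition above) =====
theorem normalize_asset_code_py_spec : Claim_equal_normalize_asset_code_py := by
  intro asset _
  unfold Spec_normalize_asset_code_py normalize_asset_code_py normalize_asset_code_py_alt
  rw [prefix_eq_takeWhile, stripXZ_eq_drop]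
  unfold pyB_strip pyA_btc pyB_btc
  rw [length_sub_dropWhile, Nat.max_eq_left (Nat.zero_le _)]
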